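-- pv_equiv track=rewrite | github.com/HongxuZhu/tianchi-FDDC-code | FDDC_PART2_V1/preprocess/tableHandler.py | cutTable
-- ===== SOURCE A (Python) =====
-- def cutTable(t2a):
--     cut = []
--     if len(t2a) > 0:
--         current_colnum = len(t2a[0])
--         tmp = []
--         for r in range(len(t2a)):
--             tr = t2a[r]
--             this_colnum = len(tr)
--             if this_colnum == current_colnum:
--                 tmp.append(tr)
--             else:
--                 cut.append(tmp)
--                 tmp = []
--                 tmp.append(tr)
--                 current_colnum = this_colnum
--             if r == (len(t2a) - 1):
--                 cut.append(tmp)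
--     return cut
-- ===== SOURCE B (Python) =====
-- def cutTable(t2a):
--     n = len(t2a)
--     if n == 0:
--         return []
--     bounds = [0]
--     for i in range(1, n):
--         if len(t2a[i]) != len(t2a[i - 1]):
--             bounds.append(i)
--     bounds.append(n)
--     return [t2a[b0:b1] for b0, b1 in zip(bounds, bounds[1:])]
-- ===== Notes on version B (the rewrite author's own statement) =====
-- stated objective: alternative
-- what changed: B replaces A's running group accumulator with a last-row special case by a two-phase boundary computation: one pass collecting the indices where the column count changes, then slicing the row list between consecutive boundaries.
import Mathlib
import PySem

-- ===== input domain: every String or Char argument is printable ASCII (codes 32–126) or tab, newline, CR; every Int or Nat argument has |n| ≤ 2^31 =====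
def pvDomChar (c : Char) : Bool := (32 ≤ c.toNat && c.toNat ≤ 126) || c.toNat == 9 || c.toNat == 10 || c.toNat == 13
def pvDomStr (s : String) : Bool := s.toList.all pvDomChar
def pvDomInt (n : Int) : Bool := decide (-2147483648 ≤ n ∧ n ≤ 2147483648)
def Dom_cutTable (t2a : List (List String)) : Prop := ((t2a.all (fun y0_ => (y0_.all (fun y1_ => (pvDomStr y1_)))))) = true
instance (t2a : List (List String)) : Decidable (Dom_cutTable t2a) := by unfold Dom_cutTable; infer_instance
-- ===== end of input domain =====

-- B groups consecutive rows of equal column count by computing the segment-boundary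
-- indices in one pass and then slicing between consecutive boundaries, instead of A's
-- running accumulator with a last-row special case; same value, same O(n) cost.

-- ===== PORT A =====
-- state: (cut, tmp, current_colnum)
def cutTable (t2a : List (List String)) : List (List (List String)) :=
  if PySem.List.len t2a > 0 then
    let n := PySem.List.len t2a
    let st := (PySem.List.pyRange 0 n 1).foldl
      (fun (st : List (List (List String)) × List (List String) × Int) r =>
        let tr := PySem.List.pyGetD t2a r []
        let this_colnum := PySem.List.len tr
        let st1 := if this_colnum == st.2.2
          then (st.1, st.2.1 ++ [tr], st.2.2)
          else (st.1 ++ [st.2.1], [tr], this_colnum)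
        if r == n - 1 then (st1.1 ++ [st1.2.1], st1.2.1, st1.2.2) else st1)
      ([], [], PySem.List.len (PySem.List.pyGetD t2a 0 []))
    st.1
  else []

-- ===== PORT B =====
def cutTable_alt (t2a : List (List String)) : List (List (List String)) :=
  let n := PySem.List.len t2a
  if n == 0 then []
  else
    let bounds := (PySem.List.pyRange 1 n 1).foldl
      (fun (bs : List Int) i =>
        if PySem.List.len (PySem.List.pyGetD t2a i []) != PySem.List.len (PySem.List.pyGetD t2a (i - 1) [])
        then bs ++ [i] else bs)
      [0]
    let bounds := bounds ++ [n]
    (List.zip bounds (PySem.List.slice bounds (some 1) none)).map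
      (fun p => PySem.List.slice t2a (some p.1) (some p.2))

-- ===== PRECONDITION & SPEC =====
def Spec_cutTable (t2a : List (List String)) (out : List (List (List String))) : Prop := out = cutTable_alt t2a
instance (t2a : List (List String)) (out : List (List (List String))) : Decidable (Spec_cutTable t2a out) := by unfold Spec_cutTable; infer_instance

-- ===== CLAIM (what is proved, stated in full; the proofs are below) =====
def Claim_equal_cutTable : Prop := ∀ (t2a : List (List String)), Dom_cutTable t2a → Spec_cutTable t2a (cutTable t2a)

-- ===== LEMMAS AND PROOFS =====

-- the common recursive specification: groups of `l` continuing the open group `tmp`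
-- whose rows have `cur` columns (the open group is always emitted at the end)
def grpFrom (tmp : List (List String)) (cur : Int) : List (List String) → List (List (List String))
  | [] => [tmp]
  | x :: xs =>
      if PySem.List.len x == cur then grpFrom (tmp ++ [x]) cur xs
      else tmp :: grpFrom [x] (PySem.List.len x) xs

-- boundary indices of `l` relative to previous row `prev`, numbering from `i`
def bAux (prev : List String) (i : Int) : List (List String) → List Int
  | [] => []
  | x :: xs =>
      (if PySem.List.len x != PySem.List.len prev then [i] else []) ++ bAux x (i + 1) xs

-- A-side step without the last-row check
def stepA
    (st : List (List (List String)) × List (List String) × Int) (tr : List String) :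
    List (List (List String)) × List (List String) × Int :=
  let this_colnum := PySem.List.len tr
  if this_colnum == st.2.2 then (st.1, st.2.1 ++ [tr], st.2.2)
  else (st.1 ++ [st.2.1], [tr], this_colnum)

-- the `r == n-1` test fires exactly on the last element of a nonempty enumerate
theorem foldl_last_fire (l : List (List String)) (s n : Int)
    (st : List (List (List String)) × List (List String) × Int)
    (hne : l ≠ []) (hn : n = s + l.length) :
    (PySem.List.enumerate l s).foldl
      (fun st p =>
        let st1 := stepA st p.2
        if p.1 == n - 1 then (st1.1 ++ [st1.2.1], st1.2.1, st1.2.2) else st1) st =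
    (let stf := (PySem.List.enumerate l s).foldl (fun st p => stepA st p.2) st
     (stf.1 ++ [stf.2.1], stf.2.1, stf.2.2)) := by
  induction l generalizing s st with
  | nil => exact absurd rfl hne
  | cons x xs ih =>
    cases xs with
    | nil =>
      have hs : (s == n - 1) = true := by
        simp only [List.length_cons, List.length_nil] at hn
        simp only [beq_iff_eq]; omega
      simp only [PySem.List.enumerate_cons, PySem.List.enumerate_nil, List.foldl_cons,
        List.foldl_nil, hs, if_pos]
    | cons y ys =>
      have hs : (s == n - 1) = false := by
        simp only [List.length_cons] at hn; push_cast at hn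
        simp only [beq_eq_false_iff_ne, ne_eq]; omega
      have hn' : n = (s + 1) + ((y :: ys).length : Int) := by
        simp only [List.length_cons] at hn ⊢; push_cast at hn ⊢; omega
      simp only [PySem.List.enumerate_cons, List.foldl_cons, hs, Bool.false_eq_true, if_false]
      exact ih (s + 1) _ (by simp) hn'

-- fold over enumerate with an index-blind step is a fold over the list
theorem foldl_enumerate_snd (l : List (List String)) (s : Int)
    (st : List (List (List String)) × List (List String) × Int) :
    (PySem.List.enumerate l s).foldl (fun st p => stepA st p.2) st = l.foldl stepA st := by
  conv_rhs => rw [← PySem.List.map_snd_enumerate l s]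
  rw [List.foldl_map]

-- the A-loop invariant: closing the open group gives `cut ++ grpFrom tmp cur l`
theorem foldl_stepA_grpFrom (l : List (List String))
    (cut : List (List (List String))) (tmp : List (List String)) (cur : Int) :
    (l.foldl stepA (cut, tmp, cur)).1 ++ [(l.foldl stepA (cut, tmp, cur)).2.1] =
      cut ++ grpFrom tmp cur l := by
  induction l generalizing cut tmp cur with
  | nil => simp [grpFrom]
  | cons x xs ih =>
    have hg : grpFrom tmp cur (x :: xs) =
        if PySem.List.len x == cur then grpFrom (tmp ++ [x]) cur xs
        else tmp :: grpFrom [x] (PySem.List.len x) xs := rfl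
    by_cases h : (PySem.List.len x == cur) = true
    · have h' : ((x.length : Int)) = cur := by simpa using h
      have hstep : stepA (cut, tmp, cur) x = (cut, tmp ++ [x], cur) := by
        simp [stepA, h']
      rw [List.foldl_cons, hstep, hg, if_pos h]
      exact ih cut (tmp ++ [x]) cur
    · have hstep : stepA (cut, tmp, cur) x = (cut ++ [tmp], [x], PySem.List.len x) := by
        simp only [stepA, h, Bool.false_eq_true, if_false]
      rw [List.foldl_cons, hstep, hg, if_neg h, ih, List.append_assoc, List.singleton_append]

theorem cutTable_eq_grpFrom (x : List String) (xs : List (List String)) :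
    cutTable (x :: xs) = grpFrom [] (PySem.List.len x) (x :: xs) := by
  have hpos : PySem.List.len (x :: xs) > 0 := by simp only [PySem.List.len_eq, List.length_cons]; push_cast; omega
  unfold cutTable
  rw [if_pos hpos]
  simp only []
  have hrange : (PySem.List.pyRange 0 (PySem.List.len (x :: xs)) 1).foldl
      (fun (st : List (List (List String)) × List (List String) × Int) r =>
        let tr := PySem.List.pyGetD (x :: xs) r []
        let this_colnum := PySem.List.len tr
        let st1 := if this_colnum == st.2.2
          then (st.1, st.2.1 ++ [tr], st.2.2)
          else (st.1 ++ [st.2.1], [tr], this_colnum)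
        if r == PySem.List.len (x :: xs) - 1 then (st1.1 ++ [st1.2.1], st1.2.1, st1.2.2) else st1)
      ([], [], PySem.List.len (PySem.List.pyGetD (x :: xs) 0 []))
      = (PySem.List.enumerate (x :: xs) 0).foldl
      (fun st p =>
        let st1 := stepA st p.2
        if p.1 == PySem.List.len (x :: xs) - 1 then (st1.1 ++ [st1.2.1], st1.2.1, st1.2.2) else st1)
      ([], [], PySem.List.len (PySem.List.pyGetD (x :: xs) 0 [])) := by
    rw [PySem.List.enumerate_eq_map_pyRange (x :: xs) ([] : List String), List.foldl_map]
    rfl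
  rw [hrange,
    foldl_last_fire (x :: xs) 0 (PySem.List.len (x :: xs)) _ (by simp)
      (by simp [PySem.List.len_eq])]
  have h0 : PySem.List.pyGetD (x :: xs) 0 [] = x := by
    simp [pysem]
  simp only [h0, foldl_enumerate_snd]
  exact foldl_stepA_grpFrom (x :: xs) [] [] (PySem.List.len x)

-- the B boundary loop computes bAux
theorem foldl_bounds (rest : List (List String)) (t2a pre : List (List String)) (x : List String)
    (acc : List Int) (s : Int) (ht : t2a = pre ++ x :: rest) (hs : s = (pre.length : Int) + 1) :
    (PySem.List.pyRange s (PySem.List.len t2a) 1).foldl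
      (fun (bs : List Int) i =>
        if PySem.List.len (PySem.List.pyGetD t2a i []) !=
           PySem.List.len (PySem.List.pyGetD t2a (i - 1) [])
        then bs ++ [i] else bs)
      acc = acc ++ bAux x s rest := by
  induction rest generalizing pre x acc s with
  | nil =>
    have hend : PySem.List.len t2a = s := by
      rw [ht, hs]; simp only [PySem.List.len_eq, List.length_append, List.length_cons,
        List.length_nil]; push_cast; omega
    rw [hend, PySem.List.pyRange_one_eq_nil (le_refl _)]
    simp [bAux]
  | cons y ys ih =>
    have hlt : s < PySem.List.len t2a := by
      rw [ht, hs]; simp only [PySem.List.len_eq, List.length_append, List.length_cons]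
      push_cast; omega
    rw [PySem.List.pyRange_one_cons hlt, List.foldl_cons]
    have hy : PySem.List.pyGetD t2a s [] = y := by
      rw [ht, hs]
      have h := PySem.List.pyGetD_natCast (pre ++ x :: y :: ys) (pre.length + 1) ([] : List String)
      push_cast at h
      rw [h]
      simp [List.getD]
    have hx : PySem.List.pyGetD t2a (s - 1) [] = x := by
      rw [ht, hs]
      have h := PySem.List.pyGetD_natCast (pre ++ x :: y :: ys) pre.length ([] : List String)
      rw [show (pre.length : Int) + 1 - 1 = (pre.length : Int) by omega, h]
      simp [List.getD]
    rw [hy, hx]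
    have ht' : t2a = (pre ++ [x]) ++ y :: ys := by rw [ht]; simp
    have hs' : s + 1 = (((pre ++ [x]).length : Nat) : Int) + 1 := by
      rw [hs]; simp
    by_cases hc : (PySem.List.len y != PySem.List.len x) = true
    · rw [if_pos hc, ih (pre ++ [x]) y (acc ++ [s]) (s + 1) ht' hs']
      have hne3 : ¬ (y.length = x.length) := by
        simp only [PySem.List.len_eq, bne_iff_ne, ne_eq] at hc
        exact_mod_cast hc
      simp [bAux, hne3]
    · rw [if_neg hc, ih (pre ++ [x]) y acc (s + 1) ht' hs']
      have heq3 : y.length = x.length := by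
        simp only [PySem.List.len_eq, bne_iff_ne, ne_eq, not_not] at hc
        exact_mod_cast hc
      simp [bAux, heq3]

-- slicing between consecutive boundaries yields grpFrom
theorem zip_slices_grpFrom (rest front : List (List String)) (x : List String) (g : Nat)
    (hg : g ≤ front.length) :
    (List.zip ((g : Int) :: (bAux x (front.length : Int) rest ++ [PySem.List.len (front ++ rest)]))
        (bAux x (front.length : Int) rest ++ [PySem.List.len (front ++ rest)])).map
      (fun p => PySem.List.slice (front ++ rest) (some p.1) (some p.2)) =
    grpFrom (PySem.List.slice (front ++ rest) (some (g : Int)) (some (front.length : Int)))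
      (PySem.List.len x) rest := by
  induction rest generalizing front x g with
  | nil =>
    simp [bAux, grpFrom, PySem.List.len_eq, List.zip]
  | cons y ys ih =>
    have hfy : front ++ y :: ys = (front ++ [y]) ++ ys := by simp
    have hlen1 : ((front ++ [y]).length : Int) = (front.length : Int) + 1 := by
      simp
    by_cases hc : (PySem.List.len y != PySem.List.len x) = true
    · -- boundary at front.length: close the group
      have hcf : (PySem.List.len y == PySem.List.len x) = false := by
        simpa [bne] using hc
      have hb : bAux x ((front.length : Nat) : Int) (y :: ys) =
          ((front.length : Nat) : Int) :: bAux y (((front.length : Nat) : Int) + 1) ys := by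
        have hne3 : ¬ (y.length = x.length) := by
          simp only [PySem.List.len_eq, bne_iff_ne, ne_eq] at hc
          exact_mod_cast hc
        simp [bAux, hne3]
      rw [hb, List.cons_append, List.zip_cons_cons, List.map_cons]
      have hrec := ih (front ++ [y]) y front.length (by simp)
      rw [hlen1, ← hfy] at hrec
      rw [hrec]
      have hslice1 : PySem.List.slice (front ++ y :: ys) (some ((front.length : Nat) : Int))
          (some ((front.length : Int) + 1)) = [y] := by
        rw [show (front.length : Int) + 1 = ((front.length + 1 : Nat) : Int) by push_cast; ring,
          PySem.List.slice_natCast]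
        simp
      rw [hslice1]
      have hgrp : grpFrom
          (PySem.List.slice (front ++ y :: ys) (some (g : Int)) (some (front.length : Int)))
          (PySem.List.len x) (y :: ys) =
          PySem.List.slice (front ++ y :: ys) (some (g : Int)) (some (front.length : Int)) ::
            grpFrom [y] (PySem.List.len y) ys := by
        rw [grpFrom, hcf]
        simp
      rw [hgrp]
    · -- same width: extend the group
      have hct : (PySem.List.len y == PySem.List.len x) = true := by
        simpa [bne] using hc
      have hcur : PySem.List.len y = PySem.List.len x := by
        have := of_decide_eq_true hct
        exact this
      have hb : bAux x ((front.length : Nat) : Int) (y :: ys) =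
          bAux y (((front.length : Nat) : Int) + 1) ys := by
        have heq3 : y.length = x.length := by
          simp only [PySem.List.len_eq, bne_iff_ne, ne_eq, not_not] at hc
          exact_mod_cast hc
        simp [bAux, heq3]
      simp only [hb]
      have hrec := ih (front ++ [y]) y g (by simp; omega)
      rw [hlen1, ← hfy] at hrec
      rw [hrec]
      have hslice : PySem.List.slice (front ++ y :: ys) (some (g : Int)) (some ((front.length : Int) + 1)) =
          PySem.List.slice (front ++ y :: ys) (some (g : Int)) (some (front.length : Int)) ++ [y] := by
        rw [show (front.length : Int) + 1 = ((front.length + 1 : Nat) : Int) by push_cast; ring,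
          PySem.List.slice_natCast, PySem.List.slice_natCast]
        have hdrop : (front ++ y :: ys).drop g = front.drop g ++ y :: ys := by
          rw [List.drop_append]
          simp [Nat.sub_eq_zero_of_le hg]
        rw [hdrop, List.take_append, List.take_append]
        have hdg : (front.drop g).length = front.length - g := by simp
        rw [List.take_of_length_le (le_of_eq_of_le hdg (by omega)),
          List.take_of_length_le (le_of_eq_of_le hdg (by omega)), hdg]
        rw [show front.length + 1 - g - (front.length - g) = 1 by omega,
          show front.length - g - (front.length - g) = 0 by omega]
        simp
      rw [hslice]
      have hgrp : grpFrom
          (PySem.List.slice (front ++ y :: ys) (some (g : Int)) (some (front.length : Int)))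
          (PySem.List.len x) (y :: ys) =
          grpFrom
            (PySem.List.slice (front ++ y :: ys) (some (g : Int)) (some (front.length : Int)) ++ [y])
            (PySem.List.len x) ys := by
        rw [grpFrom, hct]
        simp
      rw [hgrp, hcur]

theorem cutTable_alt_eq_grpFrom (x : List String) (xs : List (List String)) :
    cutTable_alt (x :: xs) = grpFrom [x] (PySem.List.len x) xs := by
  unfold cutTable_alt
  have hne : (PySem.List.len (x :: xs) == 0) = false := by
    simp [PySem.List.len_eq]
    omega
  simp only [hne, Bool.false_eq_true, if_false]
  rw [foldl_bounds xs (x :: xs) [] x [0] 1 (by simp) (by simp)]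
  have htail : PySem.List.slice (([0] ++ bAux x 1 xs) ++ [PySem.List.len (x :: xs)]) (some 1) none
      = (([0] ++ bAux x 1 xs) ++ [PySem.List.len (x :: xs)]).drop 1 := by
    have := PySem.List.slice_from_natCast ((([0] ++ bAux x 1 xs) ++ [PySem.List.len (x :: xs)])) 1
    simpa using this
  rw [htail]
  have hslice0 : PySem.List.slice (x :: xs) none (some (1 : Int)) = [x] := by
    have := PySem.List.slice_to_natCast (x :: xs) 1
    simpa using this
  have hz := zip_slices_grpFrom xs [x] x 0 (by simp)
  norm_num at hz
  rw [hslice0] at hz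
  simpa [PySem.List.len_eq] using hz

-- ===== VERDICT (by name: the statement is the Claim_ definition above) =====
theorem cutTable_spec : Claim_equal_cutTable := by
  intro t2a _
  unfold Spec_cutTable
  cases t2a with
  | nil => rfl
  | cons x xs =>
    rw [cutTable_eq_grpFrom, cutTable_alt_eq_grpFrom, grpFrom]
    simp
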